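-- pv_equiv track=rewrite | github.com/echarles503/Bachelor-Projects | CS 210 - Computer Science I/p7a_Majors.py | majors_analysis
-- ===== SOURCE A (Python) =====
-- def majors_analysis(majorsli):
--     '''(majorsli: list) -> (list, int)
--
--     Finds the mode of the list. Counts number of unique values in the list. Returns both of these values.
--     '''
--
--
--     countDict = {}
--
--     for item in majorsli:
--         if item in countDict:
--             countDict[item] += 1
--         else:
--             countDict[item] = 1
--     countList = countDict.values()
--     lenCount = len(countList)
--     maxCount = max(countList)
--
--     modeList = []
--     for item in countDict:
--         if countDict[item] == maxCount:
--             modeList.append(item)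
--
--     return modeList, lenCount
-- ===== SOURCE B (Python) =====
-- def majors_analysis(majorsli):
--     '''(majorsli: list) -> (list, int)
--
--     Mode(s) and number of unique values, via a frequency->items inverted index.
--     '''
--     countDict = {}
--     for item in majorsli:
--         countDict[item] = countDict.get(item, 0) + 1
--
--     buckets = {}
--     for item, count in countDict.items():
--         buckets.setdefault(count, []).append(item)
--
--     maxCount = max(buckets)
--     return buckets[maxCount], len(countDict)
-- ===== Notes on version B (the rewrite author's own statement) =====
-- stated objective: alternative
-- what changed: Instead of taking max over the values and re-scanning the whole dict to filter the modes, B inverts the counts into a frequency->items bucket dict in one pass (preserving first-appearance order) and returns the bucket of the maximal frequency directly.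
import Mathlib
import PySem

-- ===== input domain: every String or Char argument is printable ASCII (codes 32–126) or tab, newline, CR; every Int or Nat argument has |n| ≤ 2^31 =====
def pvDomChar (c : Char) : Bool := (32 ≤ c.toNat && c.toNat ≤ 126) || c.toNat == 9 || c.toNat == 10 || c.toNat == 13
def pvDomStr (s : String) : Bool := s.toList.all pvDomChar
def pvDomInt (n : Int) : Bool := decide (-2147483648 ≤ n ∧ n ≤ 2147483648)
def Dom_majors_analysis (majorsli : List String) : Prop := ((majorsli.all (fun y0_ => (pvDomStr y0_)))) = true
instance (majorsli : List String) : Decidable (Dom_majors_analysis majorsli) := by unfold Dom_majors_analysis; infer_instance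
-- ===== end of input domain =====

-- B replaces A's max-over-values + second filtering scan of the dict by a frequency->items
-- bucket dict built in one pass; same cost class, alternative structure.

-- ===== PORT A =====
-- the body of A's counting loop: 'if item in countDict: countDict[item] += 1 else: countDict[item] = 1'
def countStepA (d : PySem.Dict String Int) (item : String) : PySem.Dict String Int :=
  if d.contains item then d.insert item (d.getD item 0 + 1) else d.insert item 1

def majors_analysis (majorsli : List String) : List String × Int :=
  let countDict := majorsli.foldl countStepA PySem.Dict.empty
  let countList := countDict.values
  let lenCount : Int := countList.length
  match PySem.List.max? countList (fun x => x) with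
  | none => ([], lenCount)  -- max() on empty values raises ValueError; excluded by Pre_
  | some maxCount =>
    let modeList := countDict.keys.foldl
      (fun acc item => if countDict.getD item 0 == maxCount then acc ++ [item] else acc) []
    (modeList, lenCount)

-- ===== PORT B =====
-- the body of B's counting loop: 'countDict[item] = countDict.get(item, 0) + 1'
def countStepB (d : PySem.Dict String Int) (item : String) : PySem.Dict String Int :=
  d.insert item (d.getD item 0 + 1)

-- the body of B's bucket loop: 'buckets.setdefault(count, []).append(item)'
def bucketStep (b : PySem.Dict Int (List String)) (p : String × Int) : PySem.Dict Int (List String) :=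
  b.modify p.2 [] (fun l => l ++ [p.1])

def majors_analysis_alt (majorsli : List String) : List String × Int :=
  let countDict := majorsli.foldl countStepB PySem.Dict.empty
  let buckets := countDict.items.foldl bucketStep PySem.Dict.empty
  match PySem.List.max? buckets.keys (fun x => x) with
  | none => ([], (countDict.size : Int))  -- max() on an empty dict raises ValueError; excluded by Pre_
  | some maxCount => (buckets.getD maxCount [], (countDict.size : Int))
    -- buckets[maxCount]: maxCount is a key of buckets, so the KeyError branch is unreachable

-- ===== PRECONDITION & SPEC =====
-- A (and B) raise ValueError (max of an empty sequence) on the empty list; excluded.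
def Pre_majors_analysis (majorsli : List String) : Prop := majorsli ≠ []
instance (majorsli : List String) : Decidable (Pre_majors_analysis majorsli) := by
  unfold Pre_majors_analysis; infer_instance
def pvWitness_majors_analysis : List String := ["cs", "math", "cs"]

def Spec_majors_analysis (majorsli : List String) (out : List String × Int) : Prop := out = majors_analysis_alt majorsli
instance (majorsli : List String) (out : List String × Int) : Decidable (Spec_majors_analysis majorsli out) := by unfold Spec_majors_analysis; infer_instance

-- ===== CLAIM (what is proved, stated in full; the proofs are below) =====
def Claim_equal_majors_analysis : Prop := ∀ (majorsli : List String), Dom_majors_analysis majorsli → Pre_majors_analysis majorsli → Spec_majors_analysis majorsli (majors_analysis majorsli)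

-- ===== LEMMAS AND PROOFS =====

-- A's guarded increment step is the unconditional getD-increment step (getD is 0 on a missing key).
theorem countStepA_eq (d : PySem.Dict String Int) (item : String) :
    countStepA d item = d.insert item (d.getD item 0 + 1) := by
  unfold countStepA
  by_cases h : d.contains item = true
  · simp [h]
  · have h' : d.contains item = false := by simpa using h
    rw [PySem.Dict.getD_of_not_contains d 0 h']
    simp [h']

theorem foldl_countStepA (cs : List String) :
    cs.foldl countStepA PySem.Dict.empty = PySem.Dict.counter cs := by
  have hf : countStepA = fun d item => d.insert item (d.getD item 0 + 1) := by
    funext d x; exact countStepA_eq d x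
  rw [hf, PySem.Dict.foldl_insert_getD_add_one_eq_counter]

theorem foldl_countStepB (cs : List String) :
    cs.foldl countStepB PySem.Dict.empty = PySem.Dict.counter cs := by
  rw [show countStepB = fun d item => d.insert item (d.getD item 0 + 1) from rfl,
      PySem.Dict.foldl_insert_getD_add_one_eq_counter]

-- the bucket dict's keys are the distinct counts
theorem keys_buckets (l : List (String × Int)) :
    (l.foldl bucketStep PySem.Dict.empty).keys = PySem.Set.ofList (l.map (fun p => p.2)) := by
  rw [show bucketStep = fun b p => b.modify p.2 [] (fun l => l ++ [p.1]) from rfl,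
      PySem.Dict.keys_foldl_modify_key l (fun p => p.2) [] (fun _ p => fun l => l ++ [p.1])
        PySem.Dict.empty]
  show PySem.Set.update [] (l.map (fun p => p.2)) = PySem.Set.ofList (l.map (fun p => p.2))
  exact PySem.Set.update_empty _

-- the bucket of c holds, in order, the first components of the pairs whose count is c
theorem getD_buckets (l : List (String × Int)) (c : Int) :
    (l.foldl bucketStep PySem.Dict.empty).getD c []
      = (l.filter (fun p => p.2 == c)).map (fun p => p.1) := by
  have hswap : l.foldl bucketStep PySem.Dict.empty
      = (l.map (fun p => (p.2, p.1))).foldl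
          (fun b p => b.modify p.1 [] (fun l => l ++ [p.2])) PySem.Dict.empty := by
    rw [List.foldl_map]; rfl
  rw [hswap, PySem.Dict.getD_foldl_modify_append, List.filter_map]
  simp [Function.comp_def]

-- max over the distinct values equals max over the values.
theorem max?_id_ofList (xs : List Int) :
    PySem.List.max? (PySem.Set.ofList xs) (fun x => x) = PySem.List.max? xs (fun x => x) := by
  cases h1 : PySem.List.max? (PySem.Set.ofList xs) (fun x : Int => x) with
  | none =>
    have hx : PySem.Set.ofList xs = [] := (PySem.List.max?_eq_none_iff _ _).mp h1
    cases h2 : PySem.List.max? xs (fun x : Int => x) with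
    | none => rfl
    | some m =>
      have hm : m ∈ xs := PySem.List.max?_mem h2
      have : m ∈ PySem.Set.ofList xs := (PySem.Set.mem_ofList xs m).mpr hm
      rw [hx] at this; simp at this
  | some m =>
    have hm : m ∈ xs := (PySem.Set.mem_ofList xs m).mp (PySem.List.max?_mem h1)
    cases h2 : PySem.List.max? xs (fun x : Int => x) with
    | none =>
      have hx : xs = [] := (PySem.List.max?_eq_none_iff _ _).mp h2
      rw [hx] at hm; simp at hm
    | some m' =>
      have hm' : m' ∈ PySem.Set.ofList xs := (PySem.Set.mem_ofList xs m').mpr (PySem.List.max?_mem h2)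
      exact congrArg some (le_antisymm (PySem.List.max?_isMax h2 m hm) (PySem.List.max?_isMax h1 m' hm'))

-- ===== VERDICT (by name: the statement is the Claim_ definition above) =====
theorem majors_analysis_spec : Claim_equal_majors_analysis := by
  intro cs _ hpre
  unfold Spec_majors_analysis majors_analysis majors_analysis_alt
  simp only [foldl_countStepA, foldl_countStepB, keys_buckets]
  rw [show (PySem.Dict.counter cs).items.map (fun p => p.2) = (PySem.Dict.counter cs).values
        from rfl,
      max?_id_ofList]
  have hvne : (PySem.Dict.counter cs).values ≠ [] := by
    have hit : (PySem.Dict.counter cs).items ≠ [] := by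
      rw [PySem.Dict.items_counter]
      cases cs with
      | nil => exact absurd rfl hpre
      | cons c t =>
        intro h
        have : c ∈ PySem.Set.ofList (c :: t) := (PySem.Set.mem_ofList _ c).mpr (by simp)
        rw [List.map_eq_nil_iff.mp h] at this; simp at this
    simpa [PySem.Dict.values, List.map_eq_nil_iff] using hit
  cases hmx : PySem.List.max? (PySem.Dict.counter cs).values (fun x => x) with
  | none => exact absurd ((PySem.List.max?_eq_none_iff _ _).mp hmx) hvne
  | some M =>
    refine Prod.ext ?_ ?_
    · -- mode lists agree
      simp only [getD_buckets]
      have hA : (PySem.Dict.counter cs).keys.foldl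
          (fun acc item => if (PySem.Dict.counter cs).getD item 0 == M then acc ++ [item] else acc) []
          = ((PySem.Dict.counter cs).keys.filter
              (fun k => (PySem.Dict.counter cs).getD k 0 == M)).map id :=
        PySem.List.foldl_append_if (fun k => (PySem.Dict.counter cs).getD k 0 == M) id _ []
      simp only [hA, List.map_id]
      rw [PySem.Dict.items_counter, PySem.Dict.keys_counter, List.filter_map]
      rw [List.filter_congr (fun k _ => by
        simp [Function.comp, PySem.Dict.getD_counter] : ∀ k ∈ PySem.Set.ofList cs,
          ((fun k => (PySem.Dict.counter cs).getD k 0 == M) k)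
            = ((fun p => p.2 == M) ∘ fun k => (k, (List.count k cs : Int))) k)]
      simp [Function.comp_def]
    · -- unique-value counts agree
      simp [PySem.Dict.values, PySem.Dict.size]
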